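-- pv_equiv track=rewrite | github.com/2do1/Algorithm | Baekjoon/DataStructure1/3986 좋은 단어/solution.py | is_good_word
-- ===== SOURCE A (Python) =====
-- def is_good_word(word):
--     stack = []
--
--     for alphabet in word:
--         if not stack:
--             stack.append(alphabet)
--             continue
--
--         if stack[-1] == alphabet:
--             stack.pop()
--         else:
--             stack.append(alphabet)
--
--     if stack:
--         return False
--     else:
--         return True
-- ===== SOURCE B (Python) =====
-- def _one_pass(s):
--     out = []
--     i = 0
--     while i < len(s):
--         if i + 1 < len(s) and s[i] == s[i + 1]:
--             i += 2
--         else: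
--             out.append(s[i])
--             i += 1
--     return "".join(out)
--
--
-- def is_good_word(word):
--     s = word
--     while True:
--         t = _one_pass(s)
--         if t == s:
--             return s == ""
--         s = t
-- ===== Notes on version B (the rewrite author's own statement) =====
-- stated objective: alternative
-- what changed: Replaces the one-pass stack with repeated whole-string scans that delete adjacent equal pairs until a fixpoint, then tests emptiness.
import Mathlib
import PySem

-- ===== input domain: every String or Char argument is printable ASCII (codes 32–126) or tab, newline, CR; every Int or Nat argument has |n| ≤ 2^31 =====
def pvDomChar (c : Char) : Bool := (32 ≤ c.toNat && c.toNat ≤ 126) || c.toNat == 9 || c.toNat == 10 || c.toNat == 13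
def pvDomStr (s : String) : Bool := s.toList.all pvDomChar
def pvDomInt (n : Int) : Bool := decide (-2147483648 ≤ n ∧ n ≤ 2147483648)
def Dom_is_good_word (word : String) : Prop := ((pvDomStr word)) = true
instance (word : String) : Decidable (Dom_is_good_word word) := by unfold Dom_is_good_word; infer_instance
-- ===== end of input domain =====

-- B replaces A's single stack pass by repeated full scans deleting adjacent equal pairs
-- until a fixpoint, then tests emptiness (alternative decomposition, not faster).

-- ===== PORT A =====
-- one iteration of A's for-loop body (stack top kept at the head of the list)
def stepA (stack : List Char) (alphabet : Char) : List Char :=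
  match stack with
  | [] => [alphabet]
  | top :: rest => if top = alphabet then rest else alphabet :: top :: rest

def is_good_word (word : String) : Bool :=
  let stack := word.toList.foldl stepA []
  if stack.isEmpty = false then false else true

-- ===== PORT B =====
-- one left-to-right scan dropping adjacent equal pairs (Source B's _one_pass)
def onePass : List Char → List Char
  | [] => []
  | [a] => [a]
  | a :: b :: xs => if a = b then onePass xs else a :: onePass (b :: xs)

theorem onePass_length_le : ∀ s : List Char, (onePass s).length ≤ s.length := by
  intro s
  fun_induction onePass s with
  | case1 => simp
  | case2 a => simp
  | case3 b xs ih => simp; omega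
  | case4 a b xs h ih => simpa using ih

theorem onePass_lt_of_ne {s : List Char} (h : onePass s ≠ s) :
    (onePass s).length < s.length := by
  fun_induction onePass s with
  | case1 => simp at h
  | case2 a => simp at h
  | case3 b xs ih =>
      have := onePass_length_le xs
      simp; omega
  | case4 a b xs hab ih =>
      have hne : onePass (b :: xs) ≠ b :: xs := by
        intro he; exact h (by simp [he])
      simpa using Nat.succ_lt_succ (ih hne)

-- Source B's while-True loop: rescan until a pass changes nothing, then test emptiness
def loopB (s : List Char) : Bool :=
  let t := onePass s
  if h : t = s then s.isEmpty else loopB t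
termination_by s.length
decreasing_by exact onePass_lt_of_ne h

def is_good_word_alt (word : String) : Bool := loopB word.toList

-- ===== PRECONDITION & SPEC =====
def Spec_is_good_word (word : String) (out : Bool) : Prop := out = is_good_word_alt word
instance (word : String) (out : Bool) : Decidable (Spec_is_good_word word out) := by unfold Spec_is_good_word; infer_instance

-- ===== CLAIM (what is proved, stated in full; the proofs are below) =====
def Claim_equal_is_good_word : Prop := ∀ (word : String), Dom_is_good_word word → Spec_is_good_word word (is_good_word word)

-- ===== LEMMAS AND PROOFS =====

-- A's stack never holds two adjacent equal characters
theorem chain_stepA {st : List Char} (h : List.IsChain (· ≠ ·) st) (a : Char) :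
    List.IsChain (· ≠ ·) (stepA st a) := by
  match st with
  | [] => simp [stepA]
  | top :: rest =>
      simp only [stepA]
      split
      · exact h.tail
      · next hta => exact List.isChain_cons_cons.mpr ⟨Ne.symm hta, h⟩

theorem stepA_stepA {st : List Char} (h : List.IsChain (· ≠ ·) st) (a : Char) :
    stepA (stepA st a) a = st := by
  match st with
  | [] => simp [stepA]
  | top :: rest =>
      by_cases hta : top = a
      · subst hta
        match rest with
        | [] => simp [stepA]
        | c :: rs =>
            have hc : top ≠ c := (List.isChain_cons_cons.mp h).1
            simp [stepA, Ne.symm hc]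
      · simp [stepA, hta]

-- deleting the pairs found by one pass does not change A's stack
theorem foldl_onePass : ∀ (s st : List Char), List.IsChain (· ≠ ·) st →
    List.foldl stepA st (onePass s) = List.foldl stepA st s := by
  intro s
  fun_induction onePass s with
  | case1 => intro st _; rfl
  | case2 a => intro st _; rfl
  | case3 b xs ih =>
      intro st hst
      simp only [List.foldl]
      rw [ih st hst, stepA_stepA hst]
  | case4 a b xs hab ih =>
      intro st hst
      simp only [List.foldl]
      exact ih (stepA st a) (chain_stepA hst a)

theorem chain_of_onePass_fix : ∀ {s : List Char}, onePass s = s → List.IsChain (· ≠ ·) s := by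
  intro s
  fun_induction onePass s with
  | case1 => intro _; simp
  | case2 a => intro _; simp
  | case3 b xs ih =>
      intro h
      exfalso
      have h1 := onePass_length_le xs
      have h2 := congrArg List.length h
      simp at h2; omega
  | case4 a b xs hab ih =>
      intro h
      simp only [List.cons.injEq, true_and] at h
      exact List.isChain_cons_cons.mpr ⟨hab, ih h⟩

-- on an irreducible string A's stack is just its reversal
theorem foldl_irreducible : ∀ (s st : List Char), List.IsChain (· ≠ ·) s →
    (∀ a b, s.head? = some a → st.head? = some b → a ≠ b) →
    List.foldl stepA st s = s.reverse ++ st := by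
  intro s
  induction s with
  | nil => intro st _ _; simp
  | cons a xs ih =>
      intro st hchain hcompat
      have hst : stepA st a = a :: st := by
        match st with
        | [] => rfl
        | top :: rest =>
            have : a ≠ top := hcompat a top rfl rfl
            simp [stepA, Ne.symm this]
      simp only [List.foldl, hst]
      rw [ih (a :: st) hchain.tail]
      · simp
      · intro c d hc hd
        match xs, hc with
        | x :: _, rfl =>
            simp at hd
            subst hd
            exact Ne.symm (List.isChain_cons_cons.mp hchain).1
      
theorem loopB_eq_foldl : ∀ s : List Char, loopB s = (List.foldl stepA [] s).isEmpty := by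
  intro s
  fun_induction loopB s with
  | case1 s t hfix =>
      have hchain := chain_of_onePass_fix hfix
      rw [foldl_irreducible s [] hchain (by intro _ _ _ h; simp at h)]
      simp
  | case2 s t hfix ih =>
      rw [ih, foldl_onePass s [] (by simp)]

-- ===== VERDICT (by name: the statement is the Claim_ definition above) =====
theorem is_good_word_spec : Claim_equal_is_good_word := by
  intro word _
  unfold Spec_is_good_word is_good_word is_good_word_alt
  rw [loopB_eq_foldl]
  cases h : (List.foldl stepA [] word.toList).isEmpty <;> simp [h]
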